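-- pv_equiv track=rewrite | github.com/yongchanson/zb | zb1/codingTest/220324/x/4.SumOfNumber/SumOfNumber.py | solution
-- ===== SOURCE A (Python) =====
-- def solution(n):
--     """
--     :param n: int
--     :return: int
--     """
--
--     result = 0
--
--     # n부터 0까지 순회합니다.
--     for i in range(n, -1, -1):
--         val = n
--
--         # n에서 빼기 1씩 하면서 0이 되면 결과에 1을 추가합니다.
--         for j in range(n + 1):
--             val -= i - j
--             if val <= 0:
--                 if val == 0:
--                     result += 1
--                     break
--
--     return result
-- ===== SOURCE B (Python) =====
-- def solution(n):
--     # Count of odd divisors of n (A's double loop counts, for each end value i,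
--     # whether n is a sum of consecutive integers ending at i; these correspond
--     # one-to-one to odd divisors of n).
--     if n < 0:
--         return 0
--     if n == 0:
--         return 1
--     result = 0
--     for d in range(1, n + 1):
--         if n % d == 0 and d % 2 == 1:
--             result += 1
--     return result
-- ===== Notes on version B (the rewrite author's own statement) =====
-- stated objective: faster
-- what changed: Replaced A's O(n^2) double loop (for each end value i, simulate subtracting i, i-1, ... until the running value hits 0) by a single pass counting odd divisors of n, which are in bijection with the end values A counts.
import Mathlib
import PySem

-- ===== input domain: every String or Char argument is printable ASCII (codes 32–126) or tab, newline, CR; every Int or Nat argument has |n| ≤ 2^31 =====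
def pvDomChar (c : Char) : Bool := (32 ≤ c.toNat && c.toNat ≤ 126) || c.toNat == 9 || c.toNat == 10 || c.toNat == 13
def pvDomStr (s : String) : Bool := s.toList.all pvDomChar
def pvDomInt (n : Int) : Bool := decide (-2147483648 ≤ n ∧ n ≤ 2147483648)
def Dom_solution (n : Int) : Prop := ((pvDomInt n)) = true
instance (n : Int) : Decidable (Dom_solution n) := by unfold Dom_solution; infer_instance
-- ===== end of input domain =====

-- B replaces A's double loop by a single pass counting the odd divisors of n (same value, fewer passes).

-- ===== PORT A =====
-- inner 'for j in range(n+1)' loop of A: val -= i - j; on val == 0 add 1 and break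
def solInner (i : Int) (val : Int) : List Int → Int
  | [] => 0
  | j :: js =>
      let v := val - (i - j)
      if v ≤ 0 then (if v = 0 then 1 else solInner i v js) else solInner i v js

def solution (n : Int) : Int :=
  (PySem.List.pyRange n (-1) (-1)).foldl
    (fun result i => result + solInner i n (PySem.List.pyRange 0 (n + 1) 1)) 0

-- ===== PORT B =====
def solution_alt (n : Int) : Int :=
  if n < 0 then 0
  else if n = 0 then 1
  else
    (PySem.List.pyRange 1 (n + 1) 1).foldl
      (fun result d =>
        if PySem.Int.mod n d = 0 ∧ PySem.Int.mod d 2 = 1 then result + 1 else result) 0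

-- ===== PRECONDITION & SPEC =====
def Spec_solution (n : Int) (out : Int) : Prop := out = solution_alt n
instance (n : Int) (out : Int) : Decidable (Spec_solution n out) := by unfold Spec_solution; infer_instance

-- ===== CLAIM (what is proved, stated in full; the proofs are below) =====
def Claim_equal_solution : Prop := ∀ (n : Int), Dom_solution n → Spec_solution n (solution n)

-- ===== LEMMAS AND PROOFS =====

-- i is counted by A's outer loop iff n is a sum of consecutive integers ending at i,
-- i.e. ∃ k = t+1 ∈ [1, n+1] with 2n = k(2i+1-k)
abbrev condA (n i : Int) : Prop :=
  ∃ t ∈ Finset.range (n + 1).toNat, 2 * n = ((t : Int) + 1) * (2 * i + 1 - ((t : Int) + 1))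

-- the nested if of A's inner loop collapses: only val == 0 breaks
theorem solInner_cons (i val j : Int) (js : List Int) :
    solInner i val (j :: js) =
      if val - (i - j) = 0 then 1 else solInner i (val - (i - j)) js := by
  show (if val - (i - j) ≤ 0 then
          (if val - (i - j) = 0 then (1 : Int) else solInner i (val - (i - j)) js)
        else solInner i (val - (i - j)) js) = _
  split_ifs with h1 h2 h3 <;> first | rfl | omega

-- A's inner loop returns 1 iff some partial sum of the subtracted amounts equals val
theorem solInner_one_iff (js : List Int) (i : Int) : ∀ val : Int,
    solInner i val js =
      if ∃ t ∈ Finset.range js.length,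
          val = ((js.take (t + 1)).map (fun j => i - j)).sum then 1 else 0 := by
  induction js with
  | nil => intro val; simp [solInner]
  | cons j js ih =>
    intro val
    rw [solInner_cons, ih]
    have hiff : (∃ t ∈ Finset.range (j :: js).length,
          val = (((j :: js).take (t + 1)).map (fun j' => i - j')).sum)
        ↔ (val - (i - j) = 0 ∨
            ∃ t ∈ Finset.range js.length,
              val - (i - j) = ((js.take (t + 1)).map (fun j' => i - j')).sum) := by
      constructor
      · rintro ⟨t, ht, hval⟩
        cases t with
        | zero => left; simp at hval; omega
        | succ t' =>
          right
          refine ⟨t', ?_, ?_⟩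
          · simp only [Finset.mem_range, List.length_cons] at ht ⊢; omega
          · simp only [List.take_succ_cons, List.map_cons, List.sum_cons] at hval
            linarith
      · rintro (h0 | ⟨t, ht, hv⟩)
        · exact ⟨0, by simp, by simp; omega⟩
        · refine ⟨t + 1, ?_, ?_⟩
          · simp only [Finset.mem_range, List.length_cons] at ht ⊢; omega
          · simp only [List.take_succ_cons, List.map_cons, List.sum_cons]
            linarith
    by_cases hv : val - (i - j) = 0
    · rw [if_pos hv, if_pos (hiff.mpr (Or.inl hv))]
    · rw [if_neg hv]
      exact (if_congr (by rw [hiff]; simp [hv]) rfl rfl).symm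

-- Gauss-type closed form for the partial sums
theorem gauss_sum (i : Int) (m : Nat) :
    2 * ((List.range m).map (fun k : Nat => i - (0 + (k : Int)))).sum
      = (m : Int) * (2 * i - (m : Int) + 1) := by
  induction m with
  | zero => simp
  | succ m ih =>
    rw [List.range_succ, List.map_append, List.sum_append]
    simp only [List.map_cons, List.map_nil, List.sum_cons, List.sum_nil]
    push_cast
    linear_combination ih

theorem inner_char (n i : Int) (hn : 0 ≤ n) :
    solInner i n (PySem.List.pyRange 0 (n + 1) 1) = if condA n i then 1 else 0 := by
  rw [solInner_one_iff]
  refine if_congr ?_ rfl rfl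
  have hlen : (PySem.List.pyRange 0 (n + 1) 1).length = (n + 1).toNat := by
    rw [PySem.List.length_pyRange_one]; omega
  have key : ∀ t : Nat, t < (n + 1).toNat →
      2 * (((PySem.List.pyRange 0 (n + 1) 1).take (t + 1)).map (fun j => i - j)).sum
        = ((t : Int) + 1) * (2 * i - (t : Int)) := by
    intro t ht
    rw [PySem.List.pyRange_one, ← List.map_take, List.take_range, List.map_map]
    have hmin : min (t + 1) ((n + 1 - 0).toNat) = t + 1 := by omega
    rw [hmin]
    simp only [Function.comp_def]
    have hg := gauss_sum i (t + 1)
    push_cast at hg ⊢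
    linarith [hg]
  constructor
  · rintro ⟨t, ht, hsum⟩
    rw [hlen] at ht
    refine ⟨t, ht, ?_⟩
    have hk := key t (Finset.mem_range.mp ht)
    have : 2 * n = ((t : Int) + 1) * (2 * i - (t : Int)) := by rw [← hk]; omega
    linarith [this]
  · rintro ⟨t, ht, heq⟩
    refine ⟨t, by rw [hlen]; exact ht, ?_⟩
    have hk := key t (Finset.mem_range.mp ht)
    have h2 : 2 * n = 2 * (((PySem.List.pyRange 0 (n + 1) 1).take (t + 1)).map (fun j => i - j)).sum := by
      rw [hk]; linarith
    omega

theorem A_count (n : Int) (hn : 0 ≤ n) :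
    solution n =
      ((PySem.List.pyRange 0 (n + 1) 1).countP (fun i => decide (condA n i)) : Int) := by
  unfold solution
  have h0 : PySem.List.pyRange n (-1) (-1) = (PySem.List.pyRange 0 (n + 1) 1).reverse := by
    rw [PySem.List.pyRange_neg_one_eq_reverse]; norm_num
  rw [h0]
  have hstep : ((PySem.List.pyRange 0 (n + 1) 1).reverse).foldl
        (fun result i => result + solInner i n (PySem.List.pyRange 0 (n + 1) 1)) 0
      = ((PySem.List.pyRange 0 (n + 1) 1).reverse).foldl
        (fun result i => if condA n i then result + 1 else result) 0 := by
    apply PySem.List.foldl_congr_mem'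
    intro x _ acc
    rw [inner_char n x hn]
    split_ifs <;> omega
  rw [hstep, PySem.List.foldl_ite_add_one, List.countP_reverse]
  omega

theorem B_count (n : Int) (hn : 1 ≤ n) :
    solution_alt n =
      ((PySem.List.pyRange 1 (n + 1) 1).countP
        (fun d => decide (PySem.Int.mod n d = 0 ∧ PySem.Int.mod d 2 = 1)) : Int) := by
  unfold solution_alt
  rw [if_neg (by omega), if_neg (by omega), PySem.List.foldl_ite_add_one]
  omega

theorem countP_pyRange (a b : Int) (P : Int → Prop) [DecidablePred P] :
    ((PySem.List.pyRange a b 1).countP (fun x => decide (P x)))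
      = ((Finset.Icc a (b - 1)).filter P).card := by
  rw [List.countP_eq_length_filter]
  have hnd : ((PySem.List.pyRange a b 1).filter (fun x => decide (P x))).Nodup :=
    (PySem.List.nodup_pyRange_one a b).filter _
  rw [← List.toFinset_card_of_nodup hnd, List.toFinset_filter]
  congr 1
  ext x
  simp only [Finset.mem_filter, List.mem_toFinset, PySem.List.mem_pyRange_one,
    Finset.mem_Icc, decide_eq_true_eq]
  constructor
  · rintro ⟨⟨h1, h2⟩, h3⟩; exact ⟨⟨h1, by omega⟩, h3⟩
  · rintro ⟨⟨h1, h2⟩, h3⟩; exact ⟨⟨h1, by omega⟩, h3⟩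

-- decomposition of an odd divisor
theorem odd_div_decomp (n d : Int) (hn : 1 ≤ n)
    (hd : d ∈ (Finset.Icc (1 : Int) n).filter
      (fun d => PySem.Int.mod n d = 0 ∧ PySem.Int.mod d 2 = 1)) :
    ∃ a m : Int, d = 2 * a + 1 ∧ n = (2 * a + 1) * m ∧ 0 ≤ a ∧ 1 ≤ m ∧
      (d - 1) / 2 + n / d = a + m := by
  rw [Finset.mem_filter, Finset.mem_Icc] at hd
  obtain ⟨⟨hd1, hdn⟩, hmod, hodd⟩ := hd
  obtain ⟨m, hm⟩ := (PySem.Int.mod_eq_zero_iff_dvd n d).mp hmod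
  have hodd' : d % 2 = 1 := by
    rw [PySem.Int.mod_eq_emod_of_pos (by omega)] at hodd; exact hodd
  refine ⟨(d - 1) / 2, m, by omega, by rw [hm]; congr 1; omega, by omega, ?_, ?_⟩
  · nlinarith [hm]
  · have hnd : n / d = m := by
      rw [hm]; exact Int.mul_ediv_cancel_left _ (by omega : d ≠ 0)
    omega

theorem card_AB (n : Int) (hn : 1 ≤ n) :
    ((Finset.Icc (1 : Int) n).filter
        (fun d => PySem.Int.mod n d = 0 ∧ PySem.Int.mod d 2 = 1)).card
      = ((Finset.Icc (0 : Int) n).filter (condA n)).card := by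
  refine Finset.card_bij (fun d _ => (d - 1) / 2 + n / d) ?_ ?_ ?_
  · -- maps into the target filter
    intro d hd
    dsimp only
    obtain ⟨a, m, hda, hnm, ha, hm1, hmap⟩ := odd_div_decomp n d hn hd
    rw [hmap, Finset.mem_filter, Finset.mem_Icc]
    refine ⟨⟨by omega, by nlinarith⟩, ?_⟩
    refine ⟨(d - 1).toNat, ?_, ?_⟩
    · rw [Finset.mem_range]
      rw [Finset.mem_filter, Finset.mem_Icc] at hd
      omega
    · have hc : ((d - 1).toNat : Int) = d - 1 := Int.toNat_of_nonneg (by omega)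
      rw [hc, hnm, hda]
      ring
  · -- injectivity
    intro d1 hd1 d2 hd2 heq
    dsimp only at heq
    obtain ⟨a1, m1, hda1, hnm1, ha1, hm11, hmap1⟩ := odd_div_decomp n d1 hn hd1
    obtain ⟨a2, m2, hda2, hnm2, ha2, hm12, hmap2⟩ := odd_div_decomp n d2 hn hd2
    rw [hmap1, hmap2] at heq
    have key : (d2 - d1) * (d2 - 2 * m1) = 0 := by
      rw [hda1, hda2]
      linear_combination (-2 : Int) * hnm1 + 2 * hnm2 + (-2 * (2 * a2 + 1)) * heq
    rcases mul_eq_zero.mp key with h | h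
    · omega
    · omega
  · -- surjectivity
    intro i hi
    rw [Finset.mem_filter, Finset.mem_Icc] at hi
    obtain ⟨⟨hi0, hin⟩, t', ht', heq⟩ := hi
    have htn : (t' : Int) < n + 1 := by
      have := Finset.mem_range.mp ht'; omega
    set k : Int := (t' : Int) + 1 with hk
    set e : Int := 2 * i + 1 - k with he
    have hke : k * e = 2 * n := by rw [he]; linarith [heq]
    have hk1 : 1 ≤ k := by omega
    have he1 : 1 ≤ e := by nlinarith
    have hpar : k % 2 + e % 2 = 1 := by omega
    -- d := the odd one of the pair, o := the even one
    obtain ⟨d, o, hdo, hsum, hd1, ho1, hdodd⟩ :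
        ∃ d o : Int, d * o = 2 * n ∧ d + o = 2 * i + 1 ∧ 1 ≤ d ∧ 1 ≤ o ∧ d % 2 = 1 := by
      rcases (by omega : k % 2 = 1 ∨ e % 2 = 1) with h | h
      · exact ⟨k, e, hke, by omega, hk1, he1, h⟩
      · exact ⟨e, k, by rw [mul_comm]; exact hke, by omega, he1, hk1, h⟩
    have hoeven : o % 2 = 0 := by omega
    obtain ⟨m, hom⟩ : ∃ m : Int, o = 2 * m := ⟨o / 2, by omega⟩
    have hnm : n = d * m := by
      have h2 : 2 * (d * m) = 2 * n := by linear_combination hdo - d * hom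
      omega
    have hdvd : d ∣ n := ⟨m, hnm⟩
    have hdn : d ≤ n := Int.le_of_dvd (by omega) hdvd
    refine ⟨d, ?_, ?_⟩
    · rw [Finset.mem_filter, Finset.mem_Icc]
      refine ⟨⟨hd1, hdn⟩, (PySem.Int.mod_eq_zero_iff_dvd n d).mpr hdvd, ?_⟩
      rw [PySem.Int.mod_eq_emod_of_pos (by omega)]; omega
    · show (d - 1) / 2 + n / d = i
      have hnd : n / d = m := by
        rw [hnm]; exact Int.mul_ediv_cancel_left _ (by omega : d ≠ 0)
      omega

-- ===== VERDICT (by name: the statement is the Claim_ definition above) =====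
theorem solution_spec : Claim_equal_solution := by
  intro n _
  unfold Spec_solution
  rcases lt_trichotomy n 0 with hneg | hzero | hpos
  · unfold solution solution_alt
    rw [PySem.List.pyRange_neg_one_eq_nil (by omega : n ≤ -1), if_pos hneg]
    rfl
  · subst hzero; decide
  · have h1 : (1 : Int) ≤ n := by omega
    rw [A_count n (by omega), B_count n h1, countP_pyRange, countP_pyRange]
    have e2 : n + 1 - 1 = n := by omega
    rw [e2]
    exact_mod_cast (card_AB n h1).symm
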